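-- pv_equiv track=rewrite | github.com/sigjhl/p5 | src/modules/quality_assurance.py | validate_host_alternation
-- ===== SOURCE A (Python) =====
-- def validate_host_alternation(script: str) -> tuple[bool, list[str]]:
--     """
--     Validate that Host A and Host B properly alternate in the script.
--
--     Args:
--         script: The script text to validate
--
--     Returns:
--         Tuple of (is_valid, list_of_violations)
--     """
--     if '\\n' in script and script.count('\\n') > script.count('\n'):
--         script = script.replace('\\n', '\n')
--     lines = script.strip().split('\n')
--     host_lines = []
--     violations = []
--
--     for i, line in enumerate(lines, 1):
--         line = line.strip()
--         if line and (line.startswith('Host A:') or line.startswith('Host B:')):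
--             host_lines.append((i, line[:7]))  # Store line number and "Host A:" or "Host B:"
--
--     if len(host_lines) < 2:
--         return True, []  # Can't have alternation issues with less than 2 host lines
--
--     prev_host = None
--     for line_num, current_host in host_lines:
--         if prev_host == current_host:
--             violations.append(f"Line {line_num}: Consecutive {current_host} lines detected")
--         prev_host = current_host
--
--     return len(violations) == 0, violations
-- ===== SOURCE B (Python) =====
-- def validate_host_alternation(script: str) -> tuple[bool, list[str]]:
--     """Single-pass rewrite: fold over the lines keeping only prev_host and violations."""
--     if '\\n' in script and script.count('\\n') > script.count('\n'):
--         script = script.replace('\\n', '\n')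
--     prev_host = None
--     violations = []
--     for i, raw in enumerate(script.strip().split('\n'), 1):
--         line = raw.strip()
--         if line.startswith('Host A:') or line.startswith('Host B:'):
--             current = line[:7]
--             if prev_host == current:
--                 violations.append(f"Line {i}: Consecutive {current} lines detected")
--             prev_host = current
--     return len(violations) == 0, violations
-- ===== Notes on version B (the rewrite author's own statement) =====
-- stated objective: simpler
-- what changed: Fused A's two passes (build a filtered host_lines list, then scan it for consecutive duplicates) into one loop over the lines that keeps only prev_host and the violations list, dropping the intermediate list and the redundant len<2 early return.
import Mathlib
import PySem

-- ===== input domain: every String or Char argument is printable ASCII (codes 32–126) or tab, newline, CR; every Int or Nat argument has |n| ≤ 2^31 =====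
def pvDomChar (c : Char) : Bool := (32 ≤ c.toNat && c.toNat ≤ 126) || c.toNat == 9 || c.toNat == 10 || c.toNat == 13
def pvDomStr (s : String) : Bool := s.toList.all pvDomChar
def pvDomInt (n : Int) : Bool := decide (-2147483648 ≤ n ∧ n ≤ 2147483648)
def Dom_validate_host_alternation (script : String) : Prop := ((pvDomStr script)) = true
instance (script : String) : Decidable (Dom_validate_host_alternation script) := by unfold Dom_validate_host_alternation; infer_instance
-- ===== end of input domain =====

-- B fuses A's two passes into one loop over the lines, keeping only prev_host and violations (objective: simpler).

-- shared helpers: the '\n'-normalization preamble, the line classifier, the violation message,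
-- and the consecutive-duplicate scan step (identical code in both Pythons)
def pvNormalize (script : String) : String :=
  if PySem.Str.isIn "\\n" script
      && decide (PySem.Str.count script "\n" < PySem.Str.count script "\\n") then
    PySem.Str.replace script "\\n" "\n"
  else script

def pvIsHost (line : String) : Bool :=
  PySem.Str.startswith line "Host A:" || PySem.Str.startswith line "Host B:"

def pvMsg (i : Int) (cur : String) : String :=
  "Line " ++ PySem.Int.toStr i ++ ": Consecutive " ++ cur ++ " lines detected"

def pvScanBody (st : Option String × List String) (p : Int × String) : Option String × List String :=
  (some p.2, if st.1 == some p.2 then st.2 ++ [pvMsg p.1 p.2] else st.2)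

-- ===== PORT A =====
-- A's first-pass filter test ('line and (startswith …)') and projection ('(i, line[:7])')
def pvAKeep (p : Int × String) : Bool :=
  let line := PySem.Str.strip p.2
  !(line == "") && pvIsHost line

def pvProj (p : Int × String) : Int × String :=
  (p.1, PySem.Str.slice (PySem.Str.strip p.2) none (some 7))

-- literal transliteration of A: normalize, strip+split, first pass builds host_lines,
-- early return on < 2 host lines, second pass scans host_lines for consecutive duplicates
def validate_host_alternation (script : String) : Bool × List String :=
  let script := pvNormalize script
  let lines := (PySem.Str.split? (PySem.Str.strip script) "\n").getD []
  let host_lines :=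
    (PySem.List.enumerate lines 1).foldl
      (fun acc p => if pvAKeep p then acc ++ [pvProj p] else acc) []
  if host_lines.length < 2 then (true, [])
  else
    let st := host_lines.foldl pvScanBody (none, [])
    (st.2.length == 0, st.2)

-- ===== PORT B =====
-- B's fused loop body: strip the line, and if it is a host line run the scan step on (i, line[:7])
def pvBStep (st : Option String × List String) (p : Int × String) : Option String × List String :=
  let line := PySem.Str.strip p.2
  if pvIsHost line then pvScanBody st (p.1, PySem.Str.slice line none (some 7)) else st

-- literal transliteration of B: one fused loop over the enumerated lines, state (prev_host, violations)
def validate_host_alternation_alt (script : String) : Bool × List String :=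
  let script := pvNormalize script
  let st :=
    (PySem.List.enumerate ((PySem.Str.split? (PySem.Str.strip script) "\n").getD []) 1).foldl
      pvBStep (none, [])
  (st.2.length == 0, st.2)

-- ===== PRECONDITION & SPEC =====
def Spec_validate_host_alternation (script : String) (out : Bool × List String) : Prop := out = validate_host_alternation_alt script
instance (script : String) (out : Bool × List String) : Decidable (Spec_validate_host_alternation script out) := by unfold Spec_validate_host_alternation; infer_instance

-- ===== CLAIM (what is proved, stated in full; the proofs are below) =====
def Claim_equal_validate_host_alternation : Prop := ∀ (script : String), Dom_validate_host_alternation script → Spec_validate_host_alternation script (validate_host_alternation script)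

-- ===== LEMMAS AND PROOFS =====

-- a line that starts with "Host A:"/"Host B:" is nonempty, so A's extra truthiness test is redundant
lemma isHost_ne_empty (line : String) (h : pvIsHost line = true) : (line == "") = false := by
  unfold pvIsHost at h
  rcases Bool.or_eq_true_iff.mp h with h | h <;>
  · rw [PySem.Str.startswith_eq, PySem.Chars.startswith_iff] at h
    rcases h with ⟨t, ht⟩
    simp only [beq_eq_false_iff_ne, ne_eq]
    intro hc
    have : line.toList = [] := by simp [hc]
    simp [this] at ht

-- the fused loop equals A's second scan run over A's filtered-and-projected host_lines
lemma fused_eq (lines : List (Int × String)) (st : Option String × List String) :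
    lines.foldl pvBStep st
      = ((lines.filter pvAKeep).map pvProj).foldl pvScanBody st := by
  induction lines generalizing st with
  | nil => simp
  | cons q rest ih =>
    simp only [List.foldl_cons, List.filter_cons]
    by_cases h : pvIsHost (PySem.Str.strip q.2) = true
    · have hne : (PySem.Str.strip q.2 == "") = false := isHost_ne_empty _ h
      have hkeep : pvAKeep q = true := by
        unfold pvAKeep
        simp [hne, h]
      have hstep : pvBStep st q = pvScanBody st (pvProj q) := by
        unfold pvBStep pvProj
        simp [h]
      rw [hkeep, hstep, if_pos rfl, List.map_cons, List.foldl_cons, ih]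
    · have hkeep : pvAKeep q = false := by
        unfold pvAKeep
        simp [h]
      have hstep : pvBStep st q = st := by
        unfold pvBStep
        simp [h]
      rw [hkeep, hstep, ih]
      simp

-- the scan produces no violation on fewer than two host lines
lemma scan_short (hl : List (Int × String)) (h : hl.length < 2) :
    (hl.foldl pvScanBody (none, [])).2 = [] := by
  match hl, h with
  | [], _ => simp
  | [x], _ => simp [pvScanBody]

-- ===== VERDICT (by name: the statement is the Claim_ definition above) =====
theorem validate_host_alternation_spec : Claim_equal_validate_host_alternation := by
  intro script _
  unfold Spec_validate_host_alternation validate_host_alternation validate_host_alternation_alt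
  simp only [PySem.List.foldl_append_if, List.nil_append, fused_eq]
  generalize ((PySem.List.enumerate
      ((PySem.Str.split? (PySem.Str.strip (pvNormalize script)) "\n").getD []) 1).filter
        pvAKeep).map pvProj = hl
  by_cases hlen : hl.length < 2
  · rw [if_pos hlen, scan_short hl hlen]
    rfl
  · rw [if_neg hlen]
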